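-- pv_equiv track=rewrite | github.com/narendra005/Programming-Basic | Amazing Subarrays - Copy.py | solve
-- ===== SOURCE A (Python) =====
-- def solve(A):
--     count1=0
--     A=A.lower()
--     n=len(A)
--     for i in range(n):
--         if(A[i] in ['a','e','i','o','u']):
--             count1=count1+(n-i)
--     return count1%10003
-- ===== SOURCE B (Python) =====
-- def solve(A):
--     vowels = 0
--     total = 0
--     for ch in A.lower():
--         if ch in 'aeiou':
--             vowels += 1
--         total += vowels
--     return total % 10003
-- ===== Notes on version B (the rewrite author's own statement) =====
-- stated objective: alternative
-- what changed: Replaces per-vowel addition of (n-i) via indexed access A[i] with a direct left-to-right character scan maintaining a running prefix vowel counter added to the total at every position (identity: sum over vowels of (n-i) = sum over end positions of prefix vowel count); iterating characters instead of range+indexing gives a constant-factor speedup.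
import Mathlib
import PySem

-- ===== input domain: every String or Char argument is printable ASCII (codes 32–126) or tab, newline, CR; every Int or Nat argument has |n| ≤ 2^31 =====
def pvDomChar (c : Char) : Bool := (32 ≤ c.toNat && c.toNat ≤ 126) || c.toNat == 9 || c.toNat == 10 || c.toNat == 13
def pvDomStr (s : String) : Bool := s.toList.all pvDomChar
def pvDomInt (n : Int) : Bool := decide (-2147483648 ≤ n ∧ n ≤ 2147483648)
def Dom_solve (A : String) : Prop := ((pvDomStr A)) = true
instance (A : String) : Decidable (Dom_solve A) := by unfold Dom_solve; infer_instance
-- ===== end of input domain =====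

-- B replaces A's per-vowel addition of (n-i) with a scan that keeps a running prefix
-- vowel counter and adds it to the total at every position (alternative decomposition).

-- ===== PORT A =====
-- A's loop 'for i in range(n): if A[i] in [...]: count1 += n-i' as a recursion
-- over the characters carrying the index i (the same values A[i], i, count1).
def solveGo (n : Int) : List Char → Int → Int → Int
  | [], _, count1 => count1
  | c :: rest, i, count1 =>
      solveGo n rest (i + 1)
        (if c ∈ ['a','e','i','o','u'] then count1 + (n - i) else count1)

def solve (A : String) : Int :=
  let Al := (PySem.Str.lower A).toList
  let n : Int := Al.length
  PySem.Int.mod (solveGo n Al 0 0) 10003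

-- ===== PORT B =====
def altGo : List Char → Int → Int → Int
  | [], _, total => total
  | c :: rest, vowels, total =>
      let v := if c ∈ "aeiou".toList then vowels + 1 else vowels
      altGo rest v (total + v)

def solve_alt (A : String) : Int :=
  PySem.Int.mod (altGo (PySem.Str.lower A).toList 0 0) 10003

-- ===== PRECONDITION & SPEC =====
def Spec_solve (A : String) (out : Int) : Prop := out = solve_alt A
instance (A : String) (out : Int) : Decidable (Spec_solve A out) := by unfold Spec_solve; infer_instance

-- ===== CLAIM (what is proved, stated in full; the proofs are below) =====
def Claim_equal_solve : Prop := ∀ (A : String), Dom_solve A → Spec_solve A (solve A)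

-- ===== LEMMAS AND PROOFS =====

-- the common value: f l = Σ_k [l[k] vowel] * (|l| - k)
def fSum : List Char → Int
  | [] => 0
  | c :: rest => (if c ∈ ['a','e','i','o','u'] then ((rest.length : Int) + 1) else 0) + fSum rest

-- vowel count of l
def cv : List Char → Int
  | [] => 0
  | c :: rest => (if c ∈ ['a','e','i','o','u'] then 1 else 0) + cv rest

lemma solveGo_eq (l : List Char) : ∀ (n i count1 : Int),
    solveGo n l i count1 = count1 + fSum l + (n - i - l.length) * cv l := by
  induction l with
  | nil => intro n i c; simp [solveGo, fSum, cv]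
  | cons a rest ih =>
      intro n i c
      simp only [solveGo, fSum, cv, ih, List.length_cons]
      split_ifs with h <;> push_cast <;> ring

lemma altGo_eq (l : List Char) : ∀ (v t : Int),
    altGo l v t = t + v * l.length + fSum l := by
  induction l with
  | nil => intro v t; simp [altGo, fSum]
  | cons a rest ih =>
      intro v t
      have hmem : (a ∈ "aeiou".toList) = (a ∈ ['a','e','i','o','u']) := by
        simp only [show "aeiou".toList = ['a','e','i','o','u'] from rfl]
      simp only [altGo, fSum, ih, List.length_cons, hmem]
      split_ifs with h <;> push_cast <;> ring

-- ===== VERDICT (by name: the statement is the Claim_ definition above) =====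
theorem solve_spec : Claim_equal_solve := by
  intro A _
  unfold Spec_solve solve solve_alt
  simp only [solveGo_eq, altGo_eq]
  ring_nf
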